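-- pv_equiv track=rewrite | github.com/JangDongHo/Dongho-Algorithm-Note | dequeue/백준 5430번. AC/solve.py | solve
-- ===== SOURCE A (Python) =====
-- from collections import deque
--
-- def solve(funcs: list[str], list_str: str) -> str:
-- 	deq = deque(list_str.split(',')) if list_str else deque()
-- 	reverse = False
--
-- 	# 함수 실행
-- 	for func in funcs:
-- 		if func == "R":
-- 			reverse = not reverse
-- 		elif func == "D":
-- 			if not deq:
-- 				return "error"
--
-- 			if reverse:
-- 				deq.pop()
-- 			else:
-- 				deq.popleft()
--
-- 	# 출력값 정의
-- 	if reverse: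
-- 		deq.reverse()
--
-- 	return "[" + ",".join(deq) + "]"
-- ===== SOURCE B (Python) =====
-- def solve(funcs: list[str], list_str: str) -> str:
--     rev = False
--     left = 0
--     right = 0
--     for f in funcs:
--         if f == "R":
--             rev = not rev
--         elif f == "D":
--             if rev:
--                 right += 1
--             else:
--                 left += 1
--     arr = list_str.split(',') if list_str else []
--     n = len(arr)
--     if left + right > n:
--         return "error"
--     mid = arr[left:n - right]
--     if rev:
--         mid.reverse()
--     return "[" + ",".join(mid) + "]"
-- ===== Notes on version B (the rewrite author's own statement) =====
-- stated objective: simpler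
-- what changed: The deque simulation with per-operation popleft/pop is replaced by one pass that only aggregates deletions into two counters (front/back, by the reverse flag at that moment) plus a final flag; the result is a single slice arr[left:n-right], reversed if needed, and 'error' iff left+right > n.
import Mathlib
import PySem

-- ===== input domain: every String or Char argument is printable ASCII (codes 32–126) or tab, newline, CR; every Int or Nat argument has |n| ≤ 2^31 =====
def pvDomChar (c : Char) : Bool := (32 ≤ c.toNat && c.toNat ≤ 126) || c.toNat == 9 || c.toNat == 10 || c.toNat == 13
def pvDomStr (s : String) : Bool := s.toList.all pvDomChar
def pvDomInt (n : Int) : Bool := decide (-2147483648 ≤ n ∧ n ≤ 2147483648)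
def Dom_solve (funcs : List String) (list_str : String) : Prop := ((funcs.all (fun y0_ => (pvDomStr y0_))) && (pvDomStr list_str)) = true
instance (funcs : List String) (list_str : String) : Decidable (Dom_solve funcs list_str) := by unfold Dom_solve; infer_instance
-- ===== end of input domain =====

-- B replaces A's deque simulation by aggregating deletions into two counters and one final slice; objective: simpler.


-- ===== PORT A =====
-- the for-loop over funcs: deque as a List (popleft = tail, pop = dropLast); none = the early 'return "error"'
def solveLoop : List String → List String → Bool → Option (List String × Bool)
  | [], deq, rev => some (deq, rev)
  | f :: fs, deq, rev =>
    if f = "R" then solveLoop fs deq (!rev)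
    else if f = "D" then
      if deq.isEmpty then none
      else if rev then solveLoop fs deq.dropLast rev
      else solveLoop fs deq.tail rev
    else solveLoop fs deq rev

def solve (funcs : List String) (list_str : String) : String :=
  let deq := if list_str ≠ "" then (PySem.Str.split? list_str ",").getD [] else []
  match solveLoop funcs deq false with
  | none => "error"
  | some (deq, rev) =>
      let deq := if rev then deq.reverse else deq
      "[" ++ PySem.Str.join "," deq ++ "]"

-- ===== PORT B =====
-- one fold over funcs keeping (rev, left, right); then a single slice
def solve_alt (funcs : List String) (list_str : String) : String :=
  let st := funcs.foldl
    (fun (s : Bool × Nat × Nat) f =>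
      if f = "R" then (!s.1, s.2)
      else if f = "D" then
        (if s.1 then (s.1, s.2.1, s.2.2 + 1) else (s.1, s.2.1 + 1, s.2.2))
      else s)
    (false, 0, 0)
  let arr := if list_str ≠ "" then (PySem.Str.split? list_str ",").getD [] else []
  let n := arr.length
  if st.2.1 + st.2.2 > n then "error"
  else
    let mid := PySem.List.slice arr (some (st.2.1 : Int)) (some ((n : Int) - (st.2.2 : Int)))
    let mid := if st.1 then mid.reverse else mid
    "[" ++ PySem.Str.join "," mid ++ "]"

-- ===== PRECONDITION & SPEC =====
def Spec_solve (funcs : List String) (list_str : String) (out : String) : Prop := out = solve_alt funcs list_str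
instance (funcs : List String) (list_str : String) (out : String) : Decidable (Spec_solve funcs list_str out) := by unfold Spec_solve; infer_instance

-- ===== CLAIM (what is proved, stated in full; the proofs are below) =====
def Claim_equal_solve : Prop := ∀ (funcs : List String) (list_str : String), Dom_solve funcs list_str → Spec_solve funcs list_str (solve funcs list_str)

-- ===== LEMMAS AND PROOFS =====

-- B's counters, in recursive form (for the induction)
def bst : List String → Bool → Bool × Nat × Nat
  | [], rev => (rev, 0, 0)
  | f :: fs, rev =>
    if f = "R" then bst fs (!rev)
    else if f = "D" then
      let t := bst fs rev
      if rev then (t.1, t.2.1, t.2.2 + 1) else (t.1, t.2.1 + 1, t.2.2)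
    else bst fs rev

lemma foldl_eq_bst (funcs : List String) (rev : Bool) (a b : Nat) :
    funcs.foldl
      (fun (s : Bool × Nat × Nat) f =>
        if f = "R" then (!s.1, s.2)
        else if f = "D" then
          (if s.1 then (s.1, s.2.1, s.2.2 + 1) else (s.1, s.2.1 + 1, s.2.2))
        else s)
      (rev, a, b)
    = ((bst funcs rev).1, a + (bst funcs rev).2.1, b + (bst funcs rev).2.2) := by
  induction funcs generalizing rev a b with
  | nil => simp [bst]
  | cons f fs ih =>
    by_cases hR : f = "R"
    · simp [bst, hR, List.foldl_cons, ih]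
    · by_cases hD : f = "D"
      · cases rev <;> simp [bst, hR, hD, List.foldl_cons, ih] <;> omega
      · simp [bst, hR, hD, List.foldl_cons, ih]

lemma solveLoop_eq_bst (funcs : List String) (deq : List String) (rev : Bool) :
    solveLoop funcs deq rev =
      (if deq.length < (bst funcs rev).2.1 + (bst funcs rev).2.2 then none
       else some (((deq.drop (bst funcs rev).2.1).take
                    (deq.length - (bst funcs rev).2.1 - (bst funcs rev).2.2)),
                  (bst funcs rev).1)) := by
  induction funcs generalizing deq rev with
  | nil => simp [solveLoop, bst]
  | cons f fs ih =>
    by_cases hR : f = "R"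
    · simp [solveLoop, bst, hR, ih]
    · by_cases hD : f = "D"
      · subst hD
        rcases deq with _ | ⟨x, xs⟩
        · cases rev with
          | false => simp [solveLoop, bst]
          | true => simp [solveLoop, bst]
        · cases rev with
          | false =>
            simp [solveLoop, bst, ih]
            obtain ⟨rv, l, r⟩ := bst fs false
            simp only [show (xs.length + 1 < l + 1 + r) ↔ (xs.length < l + r) from by omega]
          | true =>
            simp [solveLoop, bst, ih]
            obtain ⟨rv, l, r⟩ := bst fs true
            simp only [show (xs.length + 1 < l + (r + 1)) ↔ (xs.length < l + r) from by omega]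
            by_cases hc : xs.length < l + r
            · simp [hc]
            · simp only [if_neg hc]
              have hk : xs.length + 1 - l - (r + 1) = xs.length - l - r := by omega
              rw [hk, List.dropLast_eq_take, List.drop_take, List.take_take]
              have hmin : min (xs.length - l - r) ((x :: xs).length - 1 - l)
                  = xs.length - l - r := by simp only [List.length_cons]; omega
              rw [hmin]
      · simp [solveLoop, bst, hR, hD, ih]

-- ===== VERDICT (by name: the statement is the Claim_ definition above) =====
theorem solve_spec : Claim_equal_solve := by
  intro funcs list_str _
  unfold Spec_solve solve solve_alt
  simp only [foldl_eq_bst, Nat.zero_add, solveLoop_eq_bst]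
  set arr := if list_str ≠ "" then (PySem.Str.split? list_str ",").getD [] else [] with harr
  obtain ⟨rv, l, r⟩ := bst funcs false
  simp only
  by_cases hc : arr.length < l + r
  · rw [if_pos hc, if_pos (by omega)]
  · rw [if_neg hc, if_neg (by omega)]
    have hcast : ((arr.length : Int) - (r : Int)) = ((arr.length - r : Nat) : Int) := by
      omega
    rw [hcast, PySem.List.slice_natCast]
    have : arr.length - r - l = arr.length - l - r := by omega
    rw [this]
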